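-- pv_equiv track=rewrite | github.com/gcovetta/Inversiones | sync_omar.py | extract_dashboard_html
-- ===== SOURCE A (Python) =====
-- def extract_dashboard_html(text):
--     marker = 'id="page-dashboard"'
--     pos = text.find(marker)
--     if pos == -1:
--         return None, -1, -1
--     start = text.rfind('<div', 0, pos)
--     depth, i = 0, start
--     while i < len(text):
--         if text[i:i+4] == '<div':
--             depth += 1; i += 4
--         elif text[i:i+6] == '</div>':
--             depth -= 1; i += 6
--             if depth == 0: break
--         else:
--             i += 1
--     return text[start:i], start, i
-- ===== SOURCE B (Python) =====
-- # Token-jump re-implementation: instead of A's per-character state machine,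
-- # find the next '<div' / '</div>' token with str.find and jump between tokens,
-- # keeping a depth counter.  When the marker has no '<div' before it, returns
-- # (None, -1, -1) instead of A's accidental text[-1:i] slice.
-- def extract_dashboard_html(text):
--     marker = 'id="page-dashboard"'
--     pos = text.find(marker)
--     if pos == -1:
--         return None, -1, -1
--     start = text.rfind('<div', 0, pos)
--     if start == -1:
--         return None, -1, -1
--     depth, i = 0, start
--     while True:
--         c = text.find('</div>', i)
--         if c == -1:
--             i = len(text)
--             break
--         o = text.find('<div', i)
--         if o != -1 and o < c:
--             depth += 1
--             i = o + 4
--         else: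
--             depth -= 1
--             i = c + 6
--             if depth == 0:
--                 break
--     return text[start:i], start, i
-- ===== Notes on version B (the rewrite author's own statement) =====
-- stated objective: alternative
-- what changed: B replaces A's per-character state-machine scan with a token-jump loop that uses str.find to locate the next '<div' / '</div>' occurrence and a depth counter, and returns (None, -1, -1) when no '<div' precedes the marker.
-- intended difference: On texts containing the marker but with no '<div' before it, A returns the accidental Python slice text[-1:i] (an empty or one-character fragment) with start -1, while B returns (None, -1, -1), the intended 'no enclosing div found' answer. — e.g. on extract_dashboard_html("id=\"page-dashboard\"<div></div>"): A returns (some ">", -1, 30), B returns (none, -1, -1)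
import Mathlib
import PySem

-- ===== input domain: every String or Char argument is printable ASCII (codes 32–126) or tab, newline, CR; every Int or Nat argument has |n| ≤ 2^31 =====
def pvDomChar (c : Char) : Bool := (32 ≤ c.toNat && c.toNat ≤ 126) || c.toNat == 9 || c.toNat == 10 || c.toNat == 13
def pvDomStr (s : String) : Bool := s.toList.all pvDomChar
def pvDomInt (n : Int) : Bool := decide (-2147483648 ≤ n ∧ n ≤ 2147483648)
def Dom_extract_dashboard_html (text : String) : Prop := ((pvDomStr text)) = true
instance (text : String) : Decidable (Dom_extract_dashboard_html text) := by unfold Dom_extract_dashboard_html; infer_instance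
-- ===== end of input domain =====

-- B re-implements A's per-character depth scan as a token-jump loop (str.find of the
-- next '<div' / '</div>'); on texts whose marker has no '<div' before it, B returns
-- (None, -1, -1) instead of A's accidental text[-1:i] slice (see D_ below).

-- ===== PORT A =====
-- A's while loop: per-character scan keeping (depth, i); fuel (s.length + 2) is a pure
-- totality guard (i ≥ -1 strictly increases every iteration, so it is never exhausted).
def loopA (s : List Char) : Nat → Int → Int → Int
  | 0, _, i => i
  | fuel + 1, depth, i =>
    if i < (s.length : Int) then
      if PySem.List.slice s (some i) (some (i + 4)) = ['<', 'd', 'i', 'v'] then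
        loopA s fuel (depth + 1) (i + 4)
      else if PySem.List.slice s (some i) (some (i + 6)) = ['<', '/', 'd', 'i', 'v', '>'] then
        (if depth - 1 = 0 then i + 6 else loopA s fuel (depth - 1) (i + 6))
      else loopA s fuel depth (i + 1)
    else i

def extract_dashboard_html (text : String) : Option String × Int × Int :=
  let pos := PySem.Str.find text "id=\"page-dashboard\""
  if pos = -1 then (none, -1, -1)
  else
    let start := PySem.Str.rfindFrom text "<div" 0 (some pos)
    let i := loopA text.toList (text.toList.length + 2) 0 start
    (some (PySem.Str.slice text (some start) (some i)), start, i)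

-- ===== PORT B =====
-- B's while loop: jump to the next '</div>' (c) and '<div' (o) with find, keep depth;
-- fuel (s.length + 1) is a pure totality guard (i ≥ 0 strictly increases every iteration).
def loopB (s : List Char) : Nat → Int → Int → Int
  | 0, _, i => i
  | fuel + 1, depth, i =>
    let c := PySem.Chars.findFrom s ['<', '/', 'd', 'i', 'v', '>'] i none
    if c = -1 then (s.length : Int)
    else
      let o := PySem.Chars.findFrom s ['<', 'd', 'i', 'v'] i none
      if o ≠ -1 ∧ o < c then loopB s fuel (depth + 1) (o + 4)
      else if depth - 1 = 0 then c + 6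
      else loopB s fuel (depth - 1) (c + 6)

def extract_dashboard_html_alt (text : String) : Option String × Int × Int :=
  let pos := PySem.Str.find text "id=\"page-dashboard\""
  if pos = -1 then (none, -1, -1)
  else
    let start := PySem.Str.rfindFrom text "<div" 0 (some pos)
    if start = -1 then (none, -1, -1)
    else
      let i := loopB text.toList (text.toList.length + 1) 0 start
      (some (PySem.Str.slice text (some start) (some i)), start, i)

-- ===== PRECONDITION & SPEC =====
-- On texts that contain the marker but have no '<div' before it, A falls through with
-- start = -1 and returns the accidental Python slice text[-1:i] (a nonsense fragment)
-- with start -1; B returns (None, -1, -1), the intended "no enclosing div found" answer.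
def D_extract_dashboard_html (text : String) : Prop :=
  PySem.Str.isIn "id=\"page-dashboard\"" text = true ∧
  PySem.Str.rfindFrom text "<div" 0 (some (PySem.Str.find text "id=\"page-dashboard\"")) = -1
instance (text : String) : Decidable (D_extract_dashboard_html text) := by
  unfold D_extract_dashboard_html; infer_instance

def Spec_extract_dashboard_html (text : String) (out : Option String × Int × Int) : Prop :=
  ¬ D_extract_dashboard_html text → out = extract_dashboard_html_alt text
instance (text : String) (out : Option String × Int × Int) : Decidable (Spec_extract_dashboard_html text out) := by
  unfold Spec_extract_dashboard_html; infer_instance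

def pvDiffWitness_extract_dashboard_html : String := "id=\"page-dashboard\"<div></div>"
def pvDiffWitnessOut_extract_dashboard_html : (Option String × Int × Int) × (Option String × Int × Int) :=
  ((some ">", -1, 30), (none, -1, -1))

-- ===== CLAIM (what is proved, stated in full; the proofs are below) =====
def Claim_unchanged_extract_dashboard_html : Prop := ∀ (text : String), Dom_extract_dashboard_html text → Spec_extract_dashboard_html text (extract_dashboard_html text)
def Claim_changed_extract_dashboard_html : Prop := Dom_extract_dashboard_html (pvDiffWitness_extract_dashboard_html) ∧ D_extract_dashboard_html (pvDiffWitness_extract_dashboard_html) ∧ extract_dashboard_html (pvDiffWitness_extract_dashboard_html) = pvDiffWitnessOut_extract_dashboard_html.1 ∧ extract_dashboard_html_alt (pvDiffWitness_extract_dashboard_html) = pvDiffWitnessOut_extract_dashboard_html.2 ∧ pvDiffWitnessOut_extract_dashboard_html.1 ≠ pvDiffWitnessOut_extract_dashboard_html.2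
def Claim_exact_extract_dashboard_html : Prop := ∀ (text : String), Dom_extract_dashboard_html text → D_extract_dashboard_html text → extract_dashboard_html text ≠ extract_dashboard_html_alt text

-- ===== LEMMAS AND PROOFS =====

-- A 4-char slice equals '<div' iff '<div' is a prefix of the drop (natural index).
lemma slice4_eq_iff (s : List Char) (i : Nat) :
    PySem.List.slice s (some (i : Int)) (some ((i : Int) + 4)) = ['<', 'd', 'i', 'v'] ↔
      ['<', 'd', 'i', 'v'] <+: s.drop i := by
  have h4 : ((i : Int) + 4) = ((i : Int) + ((4 : Nat) : Int)) := by norm_num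
  rw [h4, PySem.List.slice_natCast_add, List.prefix_iff_eq_take]
  constructor
  · intro h; exact h.symm
  · intro h; exact h.symm

lemma slice6_eq_iff (s : List Char) (i : Nat) :
    PySem.List.slice s (some (i : Int)) (some ((i : Int) + 6)) = ['<', '/', 'd', 'i', 'v', '>'] ↔
      ['<', '/', 'd', 'i', 'v', '>'] <+: s.drop i := by
  have h6 : ((i : Int) + 6) = ((i : Int) + ((6 : Nat) : Int)) := by norm_num
  rw [h6, PySem.List.slice_natCast_add, List.prefix_iff_eq_take]
  constructor
  · intro h; exact h.symm
  · intro h; exact h.symm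

-- a nonempty prefix of s.drop i fits inside s
lemma prefix_drop_bound (s tok : List Char) (i : Nat) (ht : 0 < tok.length)
    (h : tok <+: s.drop i) : i + tok.length ≤ s.length := by
  have h1 := h.length_le
  rw [List.length_drop] at h1
  omega

-- a prefix occurrence at j ≥ i is an infix of s.drop i
lemma infix_of_prefix_drop (s tok : List Char) (i j : Nat) (hij : i ≤ j)
    (h : tok <+: s.drop j) : tok <:+: s.drop i := by
  have hd : s.drop j = (s.drop i).drop (j - i) := by
    rw [List.drop_drop]
    congr 1
    omega
  rw [hd] at h
  exact h.isInfix.trans (List.drop_suffix _ _).isInfix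

-- where '</div>' is a prefix, '<div' is not
lemma not_div_of_cdiv (l : List Char)
    (h : ['<', '/', 'd', 'i', 'v', '>'] <+: l) : ¬ ['<', 'd', 'i', 'v'] <+: l := by
  intro hd
  have hpp := List.prefix_of_prefix_length_le hd h (by decide)
  revert hpp
  decide

-- fuel irrelevance for loopA under adequate fuel
lemma loopA_fuel (s : List Char) : ∀ (f1 f2 : Nat) (d i : Int),
    ((s.length : Int) - i).toNat < f1 → ((s.length : Int) - i).toNat < f2 →
    loopA s f1 d i = loopA s f2 d i := by
  intro f1
  induction f1 with
  | zero => intro f2 d i h1 h2; omega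
  | succ f ih =>
    intro f2 d i h1 h2
    obtain ⟨g, rfl⟩ : ∃ g, f2 = g + 1 := ⟨f2 - 1, by omega⟩
    simp only [loopA]
    by_cases hlt : i < (s.length : Int)
    · rw [if_pos hlt, if_pos hlt]
      by_cases h4 : PySem.List.slice s (some i) (some (i + 4)) = ['<', 'd', 'i', 'v']
      · rw [if_pos h4, if_pos h4]
        exact ih g (d + 1) (i + 4) (by omega) (by omega)
      · rw [if_neg h4, if_neg h4]
        by_cases h6 : PySem.List.slice s (some i) (some (i + 6)) = ['<', '/', 'd', 'i', 'v', '>']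
        · rw [if_pos h6, if_pos h6]
          by_cases hd : d - 1 = 0
          · rw [if_pos hd, if_pos hd]
          · rw [if_neg hd, if_neg hd]
            exact ih g (d - 1) (i + 6) (by omega) (by omega)
        · rw [if_neg h6, if_neg h6]
          exact ih g d (i + 1) (by omega) (by omega)
    · rw [if_neg hlt, if_neg hlt]

-- walking over token-free positions leaves loopA's result unchanged
lemma loopA_walk (s : List Char) : ∀ (n : Nat) (f : Nat) (d : Int) (i : Nat),
    i + n ≤ s.length → s.length - i < f →
    (∀ j : Nat, i ≤ j → j < i + n →
      ¬ ['<', 'd', 'i', 'v'] <+: s.drop j ∧ ¬ ['<', '/', 'd', 'i', 'v', '>'] <+: s.drop j) →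
    loopA s f d (i : Int) = loopA s f d ((i + n : Nat) : Int) := by
  intro n
  induction n with
  | zero => intro f d i _ _ _; norm_num
  | succ n ih =>
    intro f d i hlen hf hno
    obtain ⟨g, rfl⟩ : ∃ g, f = g + 1 := ⟨f - 1, by omega⟩
    have hi : i < s.length := by omega
    have hstep : loopA s (g + 1) d (i : Int) = loopA s g d ((i : Int) + 1) := by
      simp only [loopA]
      rw [if_pos (by exact_mod_cast hi), if_neg, if_neg]
      · exact fun h => (hno i le_rfl (by omega)).2 ((slice6_eq_iff s i).mp h)
      · exact fun h => (hno i le_rfl (by omega)).1 ((slice4_eq_iff s i).mp h)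
    have hcast : (i : Int) + 1 = ((i + 1 : Nat) : Int) := by push_cast; ring
    have harg : i + 1 + n = i + (n + 1) := by omega
    rw [hstep, hcast, loopA_fuel s g (g + 1) d ((i + 1 : Nat) : Int) (by omega) (by omega),
      ih (g + 1) d (i + 1) (by omega) (by omega)
        (fun j hj1 hj2 => hno j (by omega) (by omega)), harg]

-- with no '</div>' at or after i, loopA runs to the end of the text
lemma loopA_noClose (s : List Char) : ∀ (f : Nat) (d : Int) (i : Nat),
    i ≤ s.length → s.length - i < f →
    (∀ j : Nat, i ≤ j → ¬ ['<', '/', 'd', 'i', 'v', '>'] <+: s.drop j) →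
    loopA s f d (i : Int) = (s.length : Int) := by
  intro f
  induction f with
  | zero => intro d i h1 h2 h3; omega
  | succ g ih =>
    intro d i hle hf hno
    rcases Nat.lt_or_ge i s.length with hi | hi
    · simp only [loopA]
      rw [if_pos (by exact_mod_cast hi)]
      by_cases h4 : PySem.List.slice s (some (i : Int)) (some ((i : Int) + 4)) = ['<', 'd', 'i', 'v']
      · rw [if_pos h4]
        have hpre := (slice4_eq_iff s i).mp h4
        have hb : i + 4 ≤ s.length := prefix_drop_bound s _ i (by decide) hpre
        have hc : (i : Int) + 4 = ((i + 4 : Nat) : Int) := by push_cast; ring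
        rw [hc]
        exact ih (d + 1) (i + 4) (by omega) (by omega) (fun j hj => hno j (by omega))
      · rw [if_neg h4, if_neg (fun h => hno i le_rfl ((slice6_eq_iff s i).mp h))]
        have hc : (i : Int) + 1 = ((i + 1 : Nat) : Int) := by push_cast; ring
        rw [hc]
        exact ih d (i + 1) (by omega) (by omega) (fun j hj => hno j (by omega))
    · simp only [loopA]
      rw [if_neg (by omega)]
      omega

-- the main loop equivalence
lemma loopB_eq_loopA (s : List Char) : ∀ (fB fA : Nat) (d : Int) (i : Nat),
    i ≤ s.length → s.length - i < fB → s.length - i < fA →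
    loopB s fB d (i : Int) = loopA s fA d (i : Int) := by
  intro fB
  induction fB with
  | zero => intro fA d i h1 h2 h3; omega
  | succ g ih =>
    intro fA d i hle hfB hfA
    simp only [loopB]
    by_cases hc : PySem.Chars.findFrom s ['<', '/', 'd', 'i', 'v', '>'] (i : Int) none = -1
    · rw [if_pos hc]
      have hnoi : ¬ ['<', '/', 'd', 'i', 'v', '>'] <:+: s.drop i :=
        (PySem.Chars.findFrom_natCast_eq_neg_one_iff s _ i hle).mp hc
      exact (loopA_noClose s fA d i hle hfA
        (fun j hj hp => hnoi (infix_of_prefix_drop s _ i j hj hp))).symm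
    · rw [if_neg hc]
      obtain ⟨hic, hcpre, hcmin⟩ :=
        PySem.Chars.findFrom_natCast_spec s ['<', '/', 'd', 'i', 'v', '>'] i hle hc
      set c := PySem.Chars.findFrom s ['<', '/', 'd', 'i', 'v', '>'] (i : Int) none with hcdef
      have hc0 : (0 : Int) ≤ c := le_trans (by exact_mod_cast Nat.zero_le i) hic
      have hcb : c.toNat + 6 ≤ s.length := prefix_drop_bound s _ c.toNat (by decide) hcpre
      have hicn : i ≤ c.toNat := by omega
      by_cases ho : PySem.Chars.findFrom s ['<', 'd', 'i', 'v'] (i : Int) none ≠ -1 ∧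
          PySem.Chars.findFrom s ['<', 'd', 'i', 'v'] (i : Int) none < c
      · rw [if_pos ho]
        obtain ⟨hio, hopre, homin⟩ :=
          PySem.Chars.findFrom_natCast_spec s ['<', 'd', 'i', 'v'] i hle ho.1
        have holt := ho.2
        set o := PySem.Chars.findFrom s ['<', 'd', 'i', 'v'] (i : Int) none with hodef
        have ho0 : (0 : Int) ≤ o := le_trans (by exact_mod_cast Nat.zero_le i) hio
        have hob : o.toNat + 4 ≤ s.length := prefix_drop_bound s _ o.toNat (by decide) hopre
        have hion : i ≤ o.toNat := by omega
        have honcn : o.toNat < c.toNat := by omega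
        have hwalk := loopA_walk s (o.toNat - i) fA d i (by omega) (by omega)
          (fun j hj1 hj2 => ⟨homin j hj1 (by omega), hcmin j hj1 (by omega)⟩)
        rw [show i + (o.toNat - i) = o.toNat from by omega] at hwalk
        obtain ⟨h, rfl⟩ : ∃ h, fA = h + 1 := ⟨fA - 1, by omega⟩
        have hstep : loopA s (h + 1) d ((o.toNat : Nat) : Int) =
            loopA s h (d + 1) (((o.toNat : Nat) : Int) + 4) := by
          simp only [loopA]
          rw [if_pos (by omega), if_pos ((slice4_eq_iff s o.toNat).mpr hopre)]
        have hc4 : ((o.toNat : Nat) : Int) + 4 = ((o.toNat + 4 : Nat) : Int) := by push_cast; ring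
        have ho4 : o + 4 = ((o.toNat + 4 : Nat) : Int) := by omega
        rw [hwalk, hstep, hc4, ho4,
          loopA_fuel s h (h + 1) (d + 1) ((o.toNat + 4 : Nat) : Int) (by omega) (by omega)]
        exact ih (h + 1) (d + 1) (o.toNat + 4) (by omega) (by omega) (by omega)
      · rw [if_neg ho]
        push Not at ho
        have hnodiv : ∀ j : Nat, i ≤ j → j < c.toNat → ¬ ['<', 'd', 'i', 'v'] <+: s.drop j := by
          intro j hj1 hj2 hp
          by_cases hoe : PySem.Chars.findFrom s ['<', 'd', 'i', 'v'] (i : Int) none = -1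
          · exact (PySem.Chars.findFrom_natCast_eq_neg_one_iff s _ i hle).mp hoe
              (infix_of_prefix_drop s _ i j hj1 hp)
          · obtain ⟨hio, hopre, homin⟩ :=
              PySem.Chars.findFrom_natCast_spec s ['<', 'd', 'i', 'v'] i hle hoe
            have hco := ho hoe
            exact homin j hj1 (by omega) hp
        have hwalk := loopA_walk s (c.toNat - i) fA d i (by omega) (by omega)
          (fun j hj1 hj2 => ⟨hnodiv j hj1 (by omega), hcmin j hj1 (by omega)⟩)
        rw [show i + (c.toNat - i) = c.toNat from by omega] at hwalk
        obtain ⟨h, rfl⟩ : ∃ h, fA = h + 1 := ⟨fA - 1, by omega⟩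
        have hstep : loopA s (h + 1) d ((c.toNat : Nat) : Int) =
            (if d - 1 = 0 then ((c.toNat : Nat) : Int) + 6
             else loopA s h (d - 1) (((c.toNat : Nat) : Int) + 6)) := by
          simp only [loopA]
          rw [if_pos (by omega),
            if_neg (fun hx => not_div_of_cdiv _ hcpre ((slice4_eq_iff s c.toNat).mp hx)),
            if_pos ((slice6_eq_iff s c.toNat).mpr hcpre)]
        rw [hwalk, hstep]
        by_cases hd : d - 1 = 0
        · rw [if_pos hd, if_pos hd]
          omega
        · rw [if_neg hd, if_neg hd]
          have hc6 : c + 6 = ((c.toNat + 6 : Nat) : Int) := by omega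
          have hc6' : ((c.toNat : Nat) : Int) + 6 = ((c.toNat + 6 : Nat) : Int) := by push_cast; ring
          rw [hc6, hc6',
            loopA_fuel s h (h + 1) (d - 1) ((c.toNat + 6 : Nat) : Int) (by omega) (by omega)]
          exact ih (h + 1) (d - 1) (c.toNat + 6) (by omega) (by omega) (by omega)

-- rfind.go returns a valid occurrence when it does not return -1
lemma rfind_go_spec (s sub : List Char) : ∀ (m : Nat),
    PySem.Chars.rfind.go s sub m ≠ -1 →
    ∃ k : Nat, PySem.Chars.rfind.go s sub m = (k : Int) ∧ sub <+: s.drop k := by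
  intro m
  induction m with
  | zero =>
    intro h
    simp only [PySem.Chars.rfind.go] at h ⊢
    by_cases hp : sub.isPrefixOf s
    · rw [if_pos hp]
      exact ⟨0, rfl, by simpa using List.isPrefixOf_iff_prefix.mp hp⟩
    · rw [if_neg hp] at h
      exact absurd rfl h
  | succ m ih =>
    intro h
    rw [PySem.Chars.rfind.go] at h ⊢
    by_cases hp : sub.isPrefixOf (s.drop (m + 1))
    · rw [if_pos hp]
      exact ⟨m + 1, rfl, List.isPrefixOf_iff_prefix.mp hp⟩
    · rw [if_neg hp] at h ⊢
      exact ih h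

-- rfindFrom s sub 0 (some e) returns a valid occurrence in s when ≠ -1
lemma rfindFrom_spec (s sub : List Char) (e : Int) (he0 : 0 ≤ e) (hee : e ≤ (s.length : Int))
    (hne : PySem.Chars.rfindFrom s sub 0 (some e) ≠ -1) :
    ∃ k : Nat, PySem.Chars.rfindFrom s sub 0 (some e) = (k : Int) ∧ sub <+: s.drop k := by
  have h1 : ¬ ((s.length : Int) < e) := not_lt.mpr hee
  have h2 : ¬ (e < (0 : Int)) := not_lt.mpr he0
  simp only [PySem.Chars.rfindFrom, PySem.Chars.rfind, if_neg h1, if_neg h2] at hne ⊢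
  norm_num at hne ⊢
  obtain ⟨-, hr⟩ := hne
  rw [if_neg h2, if_neg hr]
  obtain ⟨k, hk, hp⟩ := rfind_go_spec (s.take e.toNat) sub (min e.toNat s.length) hr
  refine ⟨k, hk, ?_⟩
  rw [List.drop_take] at hp
  exact hp.trans (List.take_prefix _ _)

-- ===== VERDICT (by name: the statement is the Claim_ definition above) =====
theorem extract_dashboard_html_spec : Claim_unchanged_extract_dashboard_html := by
  unfold Claim_unchanged_extract_dashboard_html
  intro text _hdom
  unfold Spec_extract_dashboard_html
  intro hnD
  simp only [extract_dashboard_html, extract_dashboard_html_alt]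
  by_cases h1 : PySem.Str.find text "id=\"page-dashboard\"" = -1
  · rw [if_pos h1, if_pos h1]
  · have hin : PySem.Str.isIn "id=\"page-dashboard\"" text = true :=
      (PySem.Str.isIn_iff_infix _ _).mpr ((PySem.Str.find_ne_neg_one_iff _ _).mp h1)
    have h2 : PySem.Str.rfindFrom text "<div" 0
        (some (PySem.Str.find text "id=\"page-dashboard\"")) ≠ -1 :=
      fun h => hnD ⟨hin, h⟩
    have hp0 : 0 ≤ PySem.Str.find text "id=\"page-dashboard\"" := by
      have := PySem.Chars.neg_one_le_find text.toList "id=\"page-dashboard\"".toList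
      rw [PySem.Str.find_eq] at h1 ⊢
      omega
    have hpl : PySem.Str.find text "id=\"page-dashboard\"" ≤ (text.toList.length : Int) := by
      rw [PySem.Str.find_eq]
      exact PySem.Chars.find_le_length _ _
    have h2' : PySem.Chars.rfindFrom text.toList "<div".toList 0
        (some (PySem.Str.find text "id=\"page-dashboard\"")) ≠ -1 := by
      rw [← PySem.Str.rfindFrom_eq]
      exact h2
    obtain ⟨k, hk, hpre⟩ := rfindFrom_spec text.toList "<div".toList _ hp0 hpl h2'
    have hlit : "<div".toList = ['<', 'd', 'i', 'v'] := by decide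
    rw [hlit] at hpre
    have hb : k + 4 ≤ text.toList.length := prefix_drop_bound text.toList _ k (by decide) hpre
    have hstart : PySem.Str.rfindFrom text "<div" 0
        (some (PySem.Str.find text "id=\"page-dashboard\"")) = ((k : Nat) : Int) := by
      rw [PySem.Str.rfindFrom_eq]
      exact hk
    rw [if_neg h1, if_neg h1, if_neg h2, hstart,
      loopB_eq_loopA text.toList (text.toList.length + 1) (text.toList.length + 2) 0 k
        (by omega) (by omega) (by omega)]

theorem extract_dashboard_html_changed : Claim_changed_extract_dashboard_html := by
  unfold Claim_changed_extract_dashboard_html; decide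

theorem extract_dashboard_html_tight : Claim_exact_extract_dashboard_html := by
  unfold Claim_exact_extract_dashboard_html
  intro text _hdom hD
  obtain ⟨hin, hrf⟩ := hD
  have h1 : PySem.Str.find text "id=\"page-dashboard\"" ≠ -1 :=
    (PySem.Str.find_ne_neg_one_iff _ _).mpr ((PySem.Str.isIn_iff_infix _ _).mp hin)
  simp only [extract_dashboard_html, extract_dashboard_html_alt]
  rw [if_neg h1, if_neg h1, if_pos hrf]
  simp
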